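-- pv_equiv track=rewrite | github.com/CraftJarvis/OpenHA | openagents/agents/utils/action_mapping.py | split_continuous_segments
-- ===== SOURCE A (Python) =====
-- from typing import Union,List,Dict,Any,Optional
--
-- def split_continuous_segments(frame_ids: List[int]) -> List[List[int]]:
--     """
--     将已排序的 frame_ids 拆成若干连续段。
--     """
--     if not frame_ids:
--         return []
--
--     segments = []
--     current_segment = [frame_ids[0]]
--
--     for idx in range(1, len(frame_ids)):
--         # 如果当前帧与前一帧连续，就放进同一段
--         if frame_ids[idx] == frame_ids[idx - 1] + 1:
--             current_segment.append(frame_ids[idx])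
--         else:
--             segments.append(current_segment)
--             current_segment = [frame_ids[idx]]
--     segments.append(current_segment)
--     return segments
-- ===== SOURCE B (Python) =====
-- from itertools import groupby
-- from typing import List
--
-- def split_continuous_segments(frame_ids: List[int]) -> List[List[int]]:
--     return [[v for _, v in grp]
--             for _, grp in groupby(enumerate(frame_ids), key=lambda p: p[1] - p[0])]
-- ===== Notes on version B (the rewrite author's own statement) =====
-- stated objective: idiomatic
-- what changed: Replaces the explicit boundary-tracking accumulator loop with an itertools.groupby pass keyed on value-minus-index, which is constant exactly on consecutive runs.
import Mathlib
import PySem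

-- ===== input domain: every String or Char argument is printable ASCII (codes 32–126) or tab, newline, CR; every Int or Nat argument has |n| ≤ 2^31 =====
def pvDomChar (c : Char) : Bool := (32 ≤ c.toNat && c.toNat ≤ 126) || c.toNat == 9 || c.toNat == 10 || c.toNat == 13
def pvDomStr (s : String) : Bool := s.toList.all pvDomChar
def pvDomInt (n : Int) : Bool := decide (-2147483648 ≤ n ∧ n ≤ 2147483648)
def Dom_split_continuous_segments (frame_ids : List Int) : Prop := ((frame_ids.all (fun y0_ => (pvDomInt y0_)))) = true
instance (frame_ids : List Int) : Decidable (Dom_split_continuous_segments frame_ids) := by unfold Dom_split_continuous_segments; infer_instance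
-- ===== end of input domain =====

-- B replaces A's explicit boundary-tracking accumulator loop with a groupby pass keyed on value-minus-index (idiomatic; same cost).

-- ===== PORT A =====
-- the loop over idx = 1 .. len-1; `prev` is frame_ids[idx-1], `rest` the remaining frame_ids[idx:]
def pvLoopA (prev : Int) (rest : List Int) (segments : List (List Int)) (cur : List Int) : List (List Int) :=
  match rest with
  | [] => segments ++ [cur]
  | x :: xs =>
    if x = prev + 1 then pvLoopA x xs segments (cur ++ [x])
    else pvLoopA x xs (segments ++ [cur]) [x]

def split_continuous_segments (frame_ids : List Int) : List (List Int) :=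
  match frame_ids with
  | [] => []
  | v :: rest => pvLoopA v rest [] [v]

-- ===== PORT B =====
-- span of the leading pairs whose key (value - index) equals k, as groupby does within one group
def pvSpanKey (k : Int) : List (Int × Int) → List (Int × Int) × List (Int × Int)
  | [] => ([], [])
  | p :: ps =>
    if p.2 - p.1 = k then
      let (g, r) := pvSpanKey k ps
      (p :: g, r)
    else ([], p :: ps)

theorem pvSpanKey_len (k : Int) (ps : List (Int × Int)) : (pvSpanKey k ps).2.length ≤ ps.length := by
  induction ps with
  | nil => simp [pvSpanKey]
  | cons p ps ih =>
    simp only [pvSpanKey]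
    split
    · simpa using Nat.le_succ_of_le ih
    · simp

-- groupby(enumerate(...), key = value - index), keeping only the values of each group
def pvGroupB : List (Int × Int) → List (List Int)
  | [] => []
  | p :: ps =>
    (p.2 :: (pvSpanKey (p.2 - p.1) ps).1.map Prod.snd) :: pvGroupB (pvSpanKey (p.2 - p.1) ps).2
termination_by l => l.length
decreasing_by
  have := pvSpanKey_len (p.2 - p.1) ps
  simp only [List.length_cons]
  omega

def split_continuous_segments_alt (frame_ids : List Int) : List (List Int) :=
  pvGroupB (PySem.List.enumerate frame_ids)

-- ===== PRECONDITION & SPEC =====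
def Spec_split_continuous_segments (frame_ids : List Int) (out : List (List Int)) : Prop := out = split_continuous_segments_alt frame_ids
instance (frame_ids : List Int) (out : List (List Int)) : Decidable (Spec_split_continuous_segments frame_ids out) := by unfold Spec_split_continuous_segments; infer_instance

-- ===== CLAIM (what is proved, stated in full; the proofs are below) =====
def Claim_equal_split_continuous_segments : Prop := ∀ (frame_ids : List Int), Dom_split_continuous_segments frame_ids → Spec_split_continuous_segments frame_ids (split_continuous_segments frame_ids)

-- ===== LEMMAS AND PROOFS =====

theorem pvGroupB_nil : pvGroupB [] = [] := by simp [pvGroupB]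

theorem pvGroupB_cons (p : Int × Int) (ps : List (Int × Int)) :
    pvGroupB (p :: ps) =
      (p.2 :: (pvSpanKey (p.2 - p.1) ps).1.map Prod.snd) :: pvGroupB (pvSpanKey (p.2 - p.1) ps).2 := by
  simp [pvGroupB]

theorem pvLoopA_eq (rest : List Int) : ∀ (i prev : Int) (segs : List (List Int)) (cur : List Int),
    pvLoopA prev rest segs cur =
      segs ++ [cur ++ ((pvSpanKey (prev - i) (PySem.List.enumerate rest (i + 1))).1.map Prod.snd)]
        ++ pvGroupB (pvSpanKey (prev - i) (PySem.List.enumerate rest (i + 1))).2 := by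
  induction rest with
  | nil => intro i prev segs cur; simp [pvLoopA, pvSpanKey, pvGroupB_nil, PySem.List.enumerate]
  | cons x xs ih =>
    intro i prev segs cur
    rw [PySem.List.enumerate_cons]
    by_cases h : x = prev + 1
    · have hk : x - (i + 1) = prev - i := by omega
      simp only [pvLoopA, pvSpanKey, hk, if_pos h]
      rw [ih (i + 1) x segs (cur ++ [x])]
      have hk2 : x - (i + 1) = prev - i := hk
      simp [hk2]
    · have hk : ¬ (x - (i + 1) = prev - i) := by omega
      simp only [pvLoopA, pvSpanKey, if_neg h, if_neg hk]
      rw [ih (i + 1) x (segs ++ [cur]) [x], pvGroupB_cons]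
      simp

theorem split_eq (frame_ids : List Int) :
    split_continuous_segments frame_ids = split_continuous_segments_alt frame_ids := by
  cases frame_ids with
  | nil => simp [split_continuous_segments, split_continuous_segments_alt, PySem.List.enumerate, pvGroupB_nil]
  | cons v rest =>
    show pvLoopA v rest [] [v] = _
    rw [pvLoopA_eq rest 0 v [] [v]]
    simp only [split_continuous_segments_alt, PySem.List.enumerate_cons, pvGroupB_cons]
    simp

-- ===== VERDICT (by name: the statement is the Claim_ definition above) =====
theorem split_continuous_segments_spec : Claim_equal_split_continuous_segments := by
  intro frame_ids _
  exact split_eq frame_ids
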